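-- pv_equiv track=rewrite | github.com/neimarcos/Mestrado | new.py | encontrar_rotas
-- ===== SOURCE A (Python) =====
-- def encontrar_rotas(lista_de_rotas, rota):
--     resultado = []
--     if rota:
--         for i, lst in enumerate(lista_de_rotas):
--             if lst[0] == rota[0]:
--                 sub_resultado = encontrar_rotas(lista_de_rotas[:i]+lista_de_rotas[i+1:], rota[1:])
--                 if sub_resultado:
--                     for sub in sub_resultado:
--                         resultado.append([lst]+sub)
--                 else:
--                     if not rota[1:]:
--                         resultado.append([lst])
--     return resultado
-- ===== SOURCE B (Python) =====
-- def encontrar_rotas(lista_de_rotas, rota):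
--     if not rota:
--         return []
--     frontier = [([], list(lista_de_rotas))]
--     for r in rota:
--         new_frontier = []
--         for path, remaining in frontier:
--             for i, lst in enumerate(remaining):
--                 if lst[0] == r:
--                     new_frontier.append((path + [lst], remaining[:i] + remaining[i+1:]))
--         frontier = new_frontier
--     return [path for path, _ in frontier]
-- ===== Notes on version B (the rewrite author's own statement) =====
-- stated objective: alternative
-- what changed: Replaces A's recursion over the route (with per-branch sub-result handling) by an iterative level-by-level frontier expansion maintaining (path, remaining) states and reading the paths off at the end.
import Mathlib
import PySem

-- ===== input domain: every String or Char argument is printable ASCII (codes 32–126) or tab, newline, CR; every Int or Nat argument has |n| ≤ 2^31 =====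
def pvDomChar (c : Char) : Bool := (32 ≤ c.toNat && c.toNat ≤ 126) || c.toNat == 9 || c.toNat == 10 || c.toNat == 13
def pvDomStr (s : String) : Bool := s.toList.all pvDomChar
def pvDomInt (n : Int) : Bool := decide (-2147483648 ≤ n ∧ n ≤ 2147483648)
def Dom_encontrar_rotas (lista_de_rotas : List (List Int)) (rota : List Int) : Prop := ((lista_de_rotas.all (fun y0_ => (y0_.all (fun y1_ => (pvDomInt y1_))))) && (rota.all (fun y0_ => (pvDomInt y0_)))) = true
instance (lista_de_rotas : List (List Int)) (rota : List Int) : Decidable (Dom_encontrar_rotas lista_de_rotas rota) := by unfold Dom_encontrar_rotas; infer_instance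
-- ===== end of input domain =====

-- B replaces A's recursion over the route by an iterative frontier expansion (alternative decomposition, no speed claim).

-- ===== PORT A =====
-- Literal port of A: recursion on rota; 'for i, lst in enumerate(lista_de_rotas)' is a foldl over
-- PySem.List.enumerate; 'lst[0] == rota[0]' is pyGet? (under Pre_ every lst is nonempty, so no IndexError);
-- 'lista_de_rotas[:i]+lista_de_rotas[i+1:]' is slice ++ slice.
def encontrar_rotas (lista_de_rotas : List (List Int)) (rota : List Int) : List (List (List Int)) :=
  match rota with
  | [] => []  -- 'if rota:' is false, resultado stays []
  | r :: rest =>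
    (PySem.List.enumerate lista_de_rotas 0).foldl
      (fun resultado p =>
        if PySem.List.pyGet? p.2 0 = some r then
          let sub := encontrar_rotas
            (PySem.List.slice lista_de_rotas none (some p.1) ++
             PySem.List.slice lista_de_rotas (some (p.1 + 1)) none) rest
          if sub ≠ [] then resultado ++ sub.map (fun s => p.2 :: s)
          else if rest = [] then resultado ++ [[p.2]] else resultado
        else resultado) []

-- ===== PORT B =====
-- One level of Source B's frontier expansion: the two nested 'for' loops building new_frontier.
def erStep (r : Int) (frontier : List (List (List Int) × List (List Int))) :
    List (List (List Int) × List (List Int)) :=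
  frontier.foldl
    (fun nf st =>
      nf ++ (PySem.List.enumerate st.2 0).foldl
        (fun acc p =>
          if PySem.List.pyGet? p.2 0 = some r then
            acc ++ [(st.1 ++ [p.2],
                     PySem.List.slice st.2 none (some p.1) ++
                     PySem.List.slice st.2 (some (p.1 + 1)) none)]
          else acc) []) []

-- Literal port of Source B: guard on empty rota, fold the per-value step over rota, project the paths.
def encontrar_rotas_alt (lista_de_rotas : List (List Int)) (rota : List Int) : List (List (List Int)) :=
  match rota with
  | [] => []  -- 'if not rota: return []'
  | _ :: _ => (rota.foldl (fun f r => erStep r f) [([], lista_de_rotas)]).map Prod.fst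

-- ===== PRECONDITION & SPEC =====
-- Pre_ excludes exactly the inputs on which Python A raises IndexError ('lst[0]' on an empty candidate
-- list while rota is nonempty); A returns normally on every other input.
def Pre_encontrar_rotas (lista_de_rotas : List (List Int)) (rota : List Int) : Prop :=
  rota = [] ∨ ∀ l ∈ lista_de_rotas, l ≠ []
instance (lista_de_rotas : List (List Int)) (rota : List Int) : Decidable (Pre_encontrar_rotas lista_de_rotas rota) := by unfold Pre_encontrar_rotas; infer_instance
def pvWitness_encontrar_rotas : List (List Int) × List Int := ([[1, 2], [1, 3], [2]], [1, 2])

def Spec_encontrar_rotas (lista_de_rotas : List (List Int)) (rota : List Int) (out : List (List (List Int))) : Prop := out = encontrar_rotas_alt lista_de_rotas rota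
instance (lista_de_rotas : List (List Int)) (rota : List Int) (out : List (List (List Int))) : Decidable (Spec_encontrar_rotas lista_de_rotas rota out) := by unfold Spec_encontrar_rotas; infer_instance

-- ===== CLAIM (what is proved, stated in full; the proofs are below) =====
def Claim_equal_encontrar_rotas : Prop := ∀ (lista_de_rotas : List (List Int)) (rota : List Int), Dom_encontrar_rotas lista_de_rotas rota → Pre_encontrar_rotas lista_de_rotas rota → Spec_encontrar_rotas lista_de_rotas rota (encontrar_rotas lista_de_rotas rota)

-- ===== LEMMAS AND PROOFS =====

-- pick r rem: the matching positions, as (chosen element, remaining list with it removed), in index order.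
def pick (r : Int) : List (List Int) → List (List Int × List (List Int))
  | [] => []
  | x :: xs =>
    (if PySem.List.pyGet? x 0 = some r then [(x, xs)] else []) ++
      (pick r xs).map (fun q => (q.1, x :: q.2))

-- S rem rota: the reference enumeration both programs compute (with S rem [] = [[]]).
def S (rem : List (List Int)) : List Int → List (List (List Int))
  | [] => [[]]
  | r :: rest => (pick r rem).flatMap (fun q => (S q.2 rest).map (fun s => q.1 :: s))

theorem enum_flatMap_pick {β : Type} (r : Int) (g : List Int → List (List Int) → List β) :
    ∀ (rem pre : List (List Int)),
      (PySem.List.enumerate rem (pre.length : Int)).flatMap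
        (fun p => if PySem.List.pyGet? p.2 0 = some r then
            g p.2 (PySem.List.slice (pre ++ rem) none (some p.1) ++
                   PySem.List.slice (pre ++ rem) (some (p.1 + 1)) none)
          else [])
      = (pick r rem).flatMap (fun q => g q.1 (pre ++ q.2)) := by
  intro rem
  induction rem with
  | nil => intro pre; simp [PySem.List.enumerate, pick]
  | cons x xs ih =>
    intro pre
    have h1 : PySem.List.slice (pre ++ x :: xs) none (some (pre.length : Int)) = pre := by
      rw [PySem.List.slice_to_natCast]; exact List.take_left
    have h2 : PySem.List.slice (pre ++ x :: xs) (some ((pre.length : Int) + 1)) none = xs := by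
      have : ((pre.length : Int) + 1) = ((pre.length + 1 : Nat) : Int) := by push_cast; ring
      rw [this, PySem.List.slice_from_natCast]
      have : pre ++ x :: xs = (pre ++ [x]) ++ xs := by simp
      rw [this]
      have hl : pre.length + 1 = (pre ++ [x]).length := by simp
      rw [hl]; exact List.drop_left
    have ih' := ih (pre ++ [x])
    have hl : ((pre ++ [x]).length : Int) = (pre.length : Int) + 1 := by simp
    rw [hl] at ih'
    have happ : (pre ++ [x]) ++ xs = pre ++ x :: xs := by simp
    rw [happ] at ih'
    rw [PySem.List.enumerate_cons, List.flatMap_cons, h1, h2, ih', pick]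
    simp only [List.flatMap_append, List.flatMap_map]
    by_cases hx : PySem.List.pyGet? x 0 = some r <;> simp [hx]

-- A's cons case rewritten through pick.
theorem encontrar_rotas_cons (lista : List (List Int)) (r : Int) (rest : List Int) :
    encontrar_rotas lista (r :: rest)
      = (pick r lista).flatMap (fun q =>
          if encontrar_rotas q.2 rest ≠ [] then
            (encontrar_rotas q.2 rest).map (fun s => q.1 :: s)
          else if rest = [] then [[q.1]] else []) := by
  rw [encontrar_rotas]
  have hb : (fun (resultado : List (List (List Int))) (p : Int × List Int) =>
      if PySem.List.pyGet? p.2 0 = some r then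
        let sub := encontrar_rotas
          (PySem.List.slice lista none (some p.1) ++
           PySem.List.slice lista (some (p.1 + 1)) none) rest
        if sub ≠ [] then resultado ++ sub.map (fun s => p.2 :: s)
        else if rest = [] then resultado ++ [[p.2]] else resultado
      else resultado)
    = (fun resultado p => resultado ++
        (if PySem.List.pyGet? p.2 0 = some r then
          (fun l rm =>
            if encontrar_rotas rm rest ≠ [] then
              (encontrar_rotas rm rest).map (fun s => l :: s)
            else if rest = [] then [[l]] else []) p.2
            (PySem.List.slice lista none (some p.1) ++
             PySem.List.slice lista (some (p.1 + 1)) none)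
        else [])) := by
    funext resultado p
    by_cases h : PySem.List.pyGet? p.2 0 = some r <;> simp [h] <;> split_ifs <;> simp
  rw [hb, PySem.List.foldl_append_eq_flatMap]
  have := enum_flatMap_pick r
    (fun l rm => if encontrar_rotas rm rest ≠ [] then
        (encontrar_rotas rm rest).map (fun s => l :: s)
      else if rest = [] then [[l]] else []) lista []
  simpa using this

-- A equals the reference enumeration on nonempty routes.
theorem encontrar_rotas_eq_S : ∀ (rota : List Int) (rem : List (List Int)), rota ≠ [] →
    encontrar_rotas rem rota = S rem rota := by
  intro rota
  induction rota with
  | nil => intro rem h; exact absurd rfl h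
  | cons r rest ih =>
    intro rem _
    rw [encontrar_rotas_cons, S]
    apply List.flatMap_congr
    intro q _
    cases hrest : rest with
    | nil =>
      simp [encontrar_rotas, S]
    | cons r' rest' =>
      have hA := ih q.2 (by simp [hrest])
      rw [hrest] at hA
      rw [hA]
      by_cases h : S q.2 (r' :: rest') = [] <;> simp [h]

-- B's one-level step rewritten through pick.
theorem erStep_eq (r : Int) (frontier : List (List (List Int) × List (List Int))) :
    erStep r frontier
      = frontier.flatMap (fun st => (pick r st.2).map (fun q => (st.1 ++ [q.1], q.2))) := by
  rw [erStep]
  have hb : (fun (nf : List (List (List Int) × List (List Int))) (st : List (List Int) × List (List Int)) =>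
      nf ++ (PySem.List.enumerate st.2 0).foldl
        (fun acc p =>
          if PySem.List.pyGet? p.2 0 = some r then
            acc ++ [(st.1 ++ [p.2],
                     PySem.List.slice st.2 none (some p.1) ++
                     PySem.List.slice st.2 (some (p.1 + 1)) none)]
          else acc) [])
    = (fun nf st => nf ++ (pick r st.2).map (fun q => (st.1 ++ [q.1], q.2))) := by
    funext nf st
    congr 1
    have hb2 : (fun (acc : List (List (List Int) × List (List Int))) (p : Int × List Int) =>
        if PySem.List.pyGet? p.2 0 = some r then
          acc ++ [(st.1 ++ [p.2],
                   PySem.List.slice st.2 none (some p.1) ++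
                   PySem.List.slice st.2 (some (p.1 + 1)) none)]
        else acc)
      = (fun acc p => acc ++
          (if PySem.List.pyGet? p.2 0 = some r then
            (fun l rm => [(st.1 ++ [l], rm)]) p.2
              (PySem.List.slice st.2 none (some p.1) ++
               PySem.List.slice st.2 (some (p.1 + 1)) none)
          else [])) := by
      funext acc p
      by_cases h : PySem.List.pyGet? p.2 0 = some r <;> simp [h]
    rw [hb2, PySem.List.foldl_append_eq_flatMap]
    have h3 := enum_flatMap_pick r (fun l rm => [(st.1 ++ [l], rm)]) st.2 []
    simp only [List.length_nil, Nat.cast_zero, List.nil_append] at h3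
    simpa [List.map_eq_flatMap] using h3
  rw [hb, PySem.List.foldl_append_eq_flatMap]
  simp

-- The frontier invariant: after folding rota over a frontier, the paths are each state's
-- path prefixed onto the reference enumeration of its remaining list.
theorem frontier_inv : ∀ (rota : List Int) (frontier : List (List (List Int) × List (List Int))),
    ((rota.foldl (fun f r => erStep r f) frontier).map Prod.fst)
      = frontier.flatMap (fun st => (S st.2 rota).map (fun s => st.1 ++ s)) := by
  intro rota
  induction rota with
  | nil =>
    intro frontier
    simp [S, List.map_eq_flatMap]
  | cons r rest ih =>
    intro frontier
    rw [List.foldl_cons, ih, erStep_eq, List.flatMap_assoc]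
    simp only [S]
    apply List.flatMap_congr
    intro st _
    rw [List.flatMap_map, List.map_flatMap]
    apply List.flatMap_congr
    intro q _
    simp [List.map_map, Function.comp_def]

theorem ports_agree (lista : List (List Int)) (rota : List Int) :
    encontrar_rotas lista rota = encontrar_rotas_alt lista rota := by
  cases rota with
  | nil => rfl
  | cons r rest =>
    rw [encontrar_rotas_eq_S (r :: rest) lista (by simp)]
    show S lista (r :: rest)
      = (((r :: rest).foldl (fun f r => erStep r f) [([], lista)]).map Prod.fst)
    rw [frontier_inv]
    simp

-- ===== VERDICT (by name: the statement is the Claim_ definition above) =====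
theorem encontrar_rotas_spec : Claim_equal_encontrar_rotas := by
  intro lista rota _ _
  exact ports_agree lista rota
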